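-- pv_equiv track=rewrite | github.com/mmc00/equilibria | src/equilibria/templates/pep_calibration_unified_dynamic.py | _resolve_accounts
-- ===== SOURCE A (Python) =====
-- def _norm_label(value: str | None) -> str:
--     return (value or "").strip().upper()
--
-- def _resolve_accounts(accounts: dict[str, str] | None) -> dict[str, str]:
--     base = {
--         "gvt": "GVT",
--         "row": "ROW",
--         "td": "TD",
--         "ti": "TI",
--         "tm": "TM",
--         "tx": "TX",
--         "inv": "INV",
--         "vstk": "VSTK",
--     }
--     if not accounts:
--         return base
--     out = base.copy()
--     for k, v in accounts.items():
--         key = str(k).strip().lower()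
--         if key in out:
--             out[key] = _norm_label(str(v))
--     return out
-- ===== SOURCE B (Python) =====
-- def _norm_label(value):
--     return (value or "").strip().upper()
--
-- def _resolve_accounts(accounts):
--     base = {
--         "gvt": "GVT",
--         "row": "ROW",
--         "td": "TD",
--         "ti": "TI",
--         "tm": "TM",
--         "tx": "TX",
--         "inv": "INV",
--         "vstk": "VSTK",
--     }
--     if not accounts:
--         return base
--     idx = {str(k).strip().lower(): v for k, v in accounts.items()}
--     return {bk: (_norm_label(str(idx[bk])) if bk in idx else bv)
--             for bk, bv in base.items()}
-- ===== Notes on version B (the rewrite author's own statement) =====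
-- stated objective: alternative
-- what changed: Inverts the traversal: instead of mutating a copy of base while scanning the input items, B builds a normalized last-write-wins index from the input once and produces the result by a comprehension over the fixed base entries, normalizing the label at lookup time.
import Mathlib
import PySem

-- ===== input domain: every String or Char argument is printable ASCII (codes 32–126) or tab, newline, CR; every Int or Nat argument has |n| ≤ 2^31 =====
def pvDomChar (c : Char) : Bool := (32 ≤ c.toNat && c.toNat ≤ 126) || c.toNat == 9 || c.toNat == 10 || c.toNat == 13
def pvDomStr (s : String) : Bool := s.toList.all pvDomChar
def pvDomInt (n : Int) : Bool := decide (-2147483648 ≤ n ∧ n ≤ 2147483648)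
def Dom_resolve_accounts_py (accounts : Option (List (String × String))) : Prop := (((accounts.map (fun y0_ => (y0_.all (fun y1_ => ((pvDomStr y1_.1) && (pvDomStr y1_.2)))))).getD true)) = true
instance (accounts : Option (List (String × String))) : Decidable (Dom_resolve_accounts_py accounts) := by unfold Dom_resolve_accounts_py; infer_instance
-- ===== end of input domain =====

-- B inverts the traversal: it builds a normalized index dict from the input once, then maps over the fixed
-- base entries looking labels up in that index, instead of A's scan over the input mutating a copy of base.
-- Same cost; objective: alternative.

-- ===== PORT A =====
-- _norm_label(str(v)) : str(v) is never None, so this is v.strip().upper()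
def pvNorm (v : String) : String := PySem.Str.upper (PySem.Str.strip v)
-- str(k).strip().lower()
def pvKey (k : String) : String := PySem.Str.lower (PySem.Str.strip k)
def pvBase : PySem.Dict String String :=
  PySem.Dict.ofList [("gvt","GVT"),("row","ROW"),("td","TD"),("ti","TI"),
                     ("tm","TM"),("tx","TX"),("inv","INV"),("vstk","VSTK")]
-- one iteration of A's for-loop
def pvStepA (out : PySem.Dict String String) (kv : String × String) : PySem.Dict String String :=
  let key := pvKey kv.1
  if out.contains key then out.insert key (pvNorm kv.2) else out

def resolve_accounts_py (accounts : Option (List (String × String))) : List (String × String) :=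
  match accounts with
  | none => pvBase.items
  | some l =>
    if l = [] then pvBase.items
    else (l.foldl pvStepA pvBase).items

-- ===== PORT B =====
-- one step of B's index-building comprehension (last write wins)
def pvStepIdx (d : PySem.Dict String String) (kv : String × String) : PySem.Dict String String :=
  d.insert (pvKey kv.1) kv.2
-- one entry of B's result comprehension: look the base key up in the index
def pvLookup (idx : PySem.Dict String String) (p : String × String) : String × String :=
  match idx.get? p.1 with
  | some v => (p.1, pvNorm v)
  | none => p

def resolve_accounts_py_alt (accounts : Option (List (String × String))) : List (String × String) :=
  match accounts with
  | none => pvBase.items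
  | some l =>
    if l = [] then pvBase.items
    else
      let idx := l.foldl pvStepIdx PySem.Dict.empty
      pvBase.items.map (pvLookup idx)

-- ===== PRECONDITION & SPEC =====
def Spec_resolve_accounts_py (accounts : Option (List (String × String))) (out : List (String × String)) : Prop := out = resolve_accounts_py_alt accounts
instance (accounts : Option (List (String × String))) (out : List (String × String)) : Decidable (Spec_resolve_accounts_py accounts out) := by unfold Spec_resolve_accounts_py; infer_instance

-- ===== CLAIM (what is proved, stated in full; the proofs are below) =====
def Claim_equal_resolve_accounts_py : Prop := ∀ (accounts : Option (List (String × String))), Dom_resolve_accounts_py accounts → Spec_resolve_accounts_py accounts (resolve_accounts_py accounts)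

-- ===== LEMMAS AND PROOFS =====

-- index building never removes keys
lemma pvIdx_contains_mono (l : List (String × String)) (d : PySem.Dict String String)
    (k : String) (h : d.contains k = true) :
    (l.foldl pvStepIdx d).contains k = true := by
  induction l generalizing d with
  | nil => exact h
  | cons kv t ih =>
    simp only [List.foldl_cons]
    exact ih _ (by simp [pvStepIdx, PySem.Dict.contains_insert, h])

-- loop invariant: A's fold from `out` equals mapping B's lookup (in the full index) over `out`'s items,
-- provided `out` already agrees with the prefix index `d` on every key it holds.
lemma pvMain (l : List (String × String)) (d out : PySem.Dict String String)
    (hnd : out.keys.Nodup)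
    (hinv : ∀ p ∈ out.items, ∀ w, d.get? p.1 = some w → p.2 = pvNorm w) :
    (l.foldl pvStepA out).items = out.items.map (pvLookup (l.foldl pvStepIdx d)) := by
  induction l generalizing d out with
  | nil =>
    simp only [List.foldl_nil]
    rw [List.map_congr_left (g := id), List.map_id]
    intro p hp
    unfold pvLookup
    cases hget : d.get? p.1 with
    | none => rfl
    | some w => simp [← hinv p hp w hget]
  | cons kv t ih =>
    simp only [List.foldl_cons]
    by_cases hc : out.contains (pvKey kv.1) = true
    · -- key present: A overwrites, B's index records kv.2
      have hstep : pvStepA out kv = out.insert (pvKey kv.1) (pvNorm kv.2) := by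
        simp [pvStepA, hc]
      have hkeys : (out.insert (pvKey kv.1) (pvNorm kv.2)).keys = out.keys :=
        PySem.Dict.keys_insert_of_contains _ _ hc
      have hitems : (out.insert (pvKey kv.1) (pvNorm kv.2)).items =
          out.items.map (fun p => if p.1 == pvKey kv.1 then (pvKey kv.1, pvNorm kv.2) else p) :=
        PySem.Dict.items_insert_of_contains _ _ hc
      rw [hstep, ih (pvStepIdx d kv) _ (by rw [hkeys]; exact hnd) ?_, hitems, List.map_map]
      · -- pointwise equality of the two maps over out.items
        apply List.map_congr_left
        intro p hp
        simp only [Function.comp]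
        by_cases hpk : p.1 = pvKey kv.1
        · have hcont : (t.foldl pvStepIdx (pvStepIdx d kv)).contains (pvKey kv.1) = true := by
            apply pvIdx_contains_mono
            simp [pvStepIdx]
          have := PySem.Dict.contains_eq_isSome_get? (d := t.foldl pvStepIdx (pvStepIdx d kv)) (k := pvKey kv.1)
          rw [this] at hcont
          obtain ⟨w, hw⟩ := Option.isSome_iff_exists.mp hcont
          simp [hpk, pvLookup, hw]
        · simp [hpk, pvLookup]
      · -- the invariant is preserved
        intro p hp w hw
        rw [hitems] at hp
        obtain ⟨q, hq, rfl⟩ := List.mem_map.mp hp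
        by_cases hqk : q.1 = pvKey kv.1
        · simp only [hqk, beq_self_eq_true, if_pos] at hw ⊢
          simp only [pvStepIdx, PySem.Dict.get?_insert_self] at hw
          cases hw; rfl
        · simp only [beq_iff_eq, hqk, if_neg, not_false_iff] at hw ⊢
          rw [pvStepIdx, PySem.Dict.get?_insert_of_ne _ _ hqk] at hw
          exact hinv q hq w hw
    · -- key absent: A skips the item; the index entry is never looked up from out's keys
      have hstep : pvStepA out kv = out := by simp [pvStepA, hc]
      rw [hstep, ih (pvStepIdx d kv) out hnd ?_]
      intro p hp w hw
      have hpk : p.1 ≠ pvKey kv.1 := by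
        intro he
        have : out.contains p.1 = true := by
          rw [PySem.Dict.contains_iff_mem_keys]
          exact PySem.Dict.mem_keys_of_mem_items _ hp
        rw [he] at this; exact hc this
      rw [pvStepIdx, PySem.Dict.get?_insert_of_ne _ _ hpk] at hw
      exact hinv p hp w hw

-- ===== VERDICT (by name: the statement is the Claim_ definition above) =====
theorem resolve_accounts_py_spec : Claim_equal_resolve_accounts_py := by
  intro accounts _
  show resolve_accounts_py accounts = resolve_accounts_py_alt accounts
  cases accounts with
  | none => rfl
  | some l =>
    simp only [resolve_accounts_py, resolve_accounts_py_alt]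
    by_cases hl : l = []
    · simp [hl]
    · simp only [hl, if_neg, not_false_iff]
      exact pvMain l PySem.Dict.empty pvBase (by decide)
        (by intro p _ w hw; simp [PySem.Dict.get?_empty] at hw)
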